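-- pv_equiv track=rewrite | github.com/TriggerJames/alx-frontend-for-fun | markdown2html.py | convert_paragraphs
-- ===== SOURCE A (Python) =====
-- def convert_paragraphs(lines):
--     """
--     Convert plain text to HTML paragraphs and handle line breaks.
--     """
--     html_lines = []
--     inside_paragraph = False
--     for line in lines:
--         if line.strip():
--             if not inside_paragraph:
--                 html_lines.append("<p>")
--                 inside_paragraph = True
--             html_lines.append(line.strip())
--         else:
--             if inside_paragraph:
--                 html_lines.append("</p>")
--                 inside_paragraph = False
--     if inside_paragraph:
--         html_lines.append("</p>")
--     return html_lines
-- ===== SOURCE B (Python) =====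
-- def convert_paragraphs(lines):
--     stripped = [l.strip() for l in lines]
--     flags = [bool(s) for s in stripped]
--     n = len(lines)
--     starts = [i for i in range(n) if flags[i] and (i == 0 or not flags[i - 1])]
--     ends = [i for i in range(n) if flags[i] and (i == n - 1 or not flags[i + 1])]
--     html_lines = []
--     for s, e in zip(starts, ends):
--         html_lines.append("<p>")
--         html_lines.extend(stripped[s:e + 1])
--         html_lines.append("</p>")
--     return html_lines
-- ===== Notes on version B (the rewrite author's own statement) =====
-- stated objective: alternative
-- what changed: Replaces A's single-pass scan with an inside_paragraph state flag by a staged, stateless computation: comprehensions over indices detect paragraph boundaries (a start is a non-blank line with a blank or no predecessor, an end one with a blank or no successor), and zipping the start/end index lists yields the paragraph slices that are rendered.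
import Mathlib
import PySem

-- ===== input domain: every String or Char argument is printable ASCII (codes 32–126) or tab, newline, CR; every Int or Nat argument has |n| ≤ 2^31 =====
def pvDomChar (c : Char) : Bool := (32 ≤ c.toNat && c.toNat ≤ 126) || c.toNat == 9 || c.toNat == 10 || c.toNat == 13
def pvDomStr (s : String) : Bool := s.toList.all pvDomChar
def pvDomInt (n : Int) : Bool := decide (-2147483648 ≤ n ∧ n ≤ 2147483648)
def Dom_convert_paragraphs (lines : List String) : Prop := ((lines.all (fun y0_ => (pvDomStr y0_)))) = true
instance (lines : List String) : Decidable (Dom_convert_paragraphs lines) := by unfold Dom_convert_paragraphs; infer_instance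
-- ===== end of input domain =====

-- B replaces A's stateful inside_paragraph scan by a staged, stateless computation:
-- index comprehensions detect paragraph start/end boundaries and the zipped pairs
-- are rendered as slices (alternative decomposition, same cost).

-- ===== PORT A =====
-- the loop of A: state = (accumulated html_lines, inside_paragraph flag)
def convertParasGo (ls : List String) (acc : List String) (inside : Bool) : List String :=
  match ls with
  | [] => if inside then acc ++ ["</p>"] else acc
  | l :: rest =>
    if PySem.Str.strip l ≠ "" then
      if !inside then convertParasGo rest (acc ++ ["<p>", PySem.Str.strip l]) true
      else convertParasGo rest (acc ++ [PySem.Str.strip l]) true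
    else
      if inside then convertParasGo rest (acc ++ ["</p>"]) false
      else convertParasGo rest acc false

def convert_paragraphs (lines : List String) : List String :=
  convertParasGo lines [] false

-- ===== PORT B =====
def convert_paragraphs_alt (lines : List String) : List String :=
  let stripped := lines.map PySem.Str.strip
  let flags := stripped.map (fun s => decide (s ≠ ""))
  let n := lines.length
  let starts := (List.range n).filter
    (fun i => flags.getD i false && (decide (i = 0) || !(flags.getD (i - 1) false)))
  let ends := (List.range n).filter
    (fun i => flags.getD i false && (decide (i = n - 1) || !(flags.getD (i + 1) false)))
  (starts.zip ends).flatMap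
    (fun se => "<p>" :: ((stripped.drop se.1).take (se.2 + 1 - se.1)) ++ ["</p>"])

-- ===== PRECONDITION & SPEC =====
def Spec_convert_paragraphs (lines : List String) (out : List String) : Prop := out = convert_paragraphs_alt lines
instance (lines : List String) (out : List String) : Decidable (Spec_convert_paragraphs lines out) := by unfold Spec_convert_paragraphs; infer_instance

-- ===== CLAIM (what is proved, stated in full; the proofs are below) =====
def Claim_equal_convert_paragraphs : Prop := ∀ (lines : List String), Dom_convert_paragraphs lines → Spec_convert_paragraphs lines (convert_paragraphs lines)

-- ===== LEMMAS AND PROOFS =====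

-- proof-only helpers: run bounds of the maximal non-blank runs, and recursive
-- forms of B's start/end index comprehensions
def shiftP (p : Nat × Nat) : Nat × Nat := (p.1 + 1, p.2 + 1)

def runB : List Bool → List (Nat × Nat)
  | [] => []
  | f :: fs =>
    if f then
      if fs.headD false then
        match runB fs with
        | (_, e) :: ps => (0, e + 1) :: ps.map shiftP
        | [] => [(0, 0)]   -- unreachable: runB of a list starting with true is nonempty
      else (0, 0) :: (runB fs).map shiftP
    else (runB fs).map shiftP

def sIdx : Bool → List Bool → List Nat
  | _, [] => []
  | prev, f :: fs =>
    if f && !prev then 0 :: (sIdx f fs).map (· + 1) else (sIdx f fs).map (· + 1)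

def eIdx : List Bool → List Nat
  | [] => []
  | f :: fs =>
    if f && !(fs.headD false) then 0 :: (eIdx fs).map (· + 1) else (eIdx fs).map (· + 1)

def render (st : List String) (ps : List (Nat × Nat)) : List String :=
  ps.flatMap (fun se => "<p>" :: ((st.drop se.1).take (se.2 + 1 - se.1)) ++ ["</p>"])

def flagsOf (st : List String) : List Bool := st.map (fun s => decide (s ≠ ""))

def Rb (st : List String) : List String := render st (runB (flagsOf st))

def Tb (st : List String) : List String :=
  match runB (flagsOf st) with
  | [] => "</p>" :: Rb st
  | (s, e) :: ps =>
    if s = 0 then st.take (e + 1) ++ "</p>" :: render st ps else "</p>" :: Rb st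

lemma runB_head_zero (fs : List Bool) (h : fs.headD false = true) :
    ∃ e ps, runB fs = (0, e) :: ps := by
  cases fs with
  | nil => simp at h
  | cons f gs =>
    simp at h
    subst h
    simp only [runB]
    by_cases hg : gs.headD false = true
    · simp only [hg]
      cases hr : runB gs with
      | nil => exact ⟨0, [], rfl⟩
      | cons p ps => exact ⟨p.2 + 1, ps.map shiftP, rfl⟩
    · simp only [hg]
      exact ⟨0, (runB gs).map shiftP, by simp⟩

lemma render_shift (x : String) (st : List String) (ps : List (Nat × Nat)) :
    render (x :: st) (ps.map shiftP) = render st ps := by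
  simp only [render, List.flatMap_map]
  congr 1
  funext p
  have h2 : p.2 + 1 + 1 - (p.1 + 1) = p.2 + 1 - p.1 := by omega
  simp [shiftP, h2]

lemma Rb_nil : Rb [] = [] := by simp [Rb, flagsOf, runB, render]

lemma Tb_nil : Tb [] = ["</p>"] := by simp [Tb, Rb, flagsOf, runB, render]

lemma flagsOf_cons (x : String) (rest : List String) :
    flagsOf (x :: rest) = decide (x ≠ "") :: flagsOf rest := by simp [flagsOf]

lemma Rb_blank (rest : List String) : Rb ("" :: rest) = Rb rest := by
  simp only [Rb, flagsOf_cons]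
  have h0 : (decide (("" : String) ≠ "")) = false := by decide
  rw [h0]
  simp only [runB, Bool.false_eq_true, if_false]
  exact render_shift _ _ _

lemma Tb_blank (rest : List String) : Tb ("" :: rest) = "</p>" :: Rb rest := by
  have h0 : (decide (("" : String) ≠ "")) = false := by decide
  simp only [Tb, flagsOf_cons, h0]
  simp only [runB, Bool.false_eq_true, if_false]
  cases hg : runB (flagsOf rest) with
  | nil => simp [Rb, flagsOf_cons, runB, hg, render]
  | cons q qs =>
    simp only [List.map_cons]
    have hq : shiftP q = (q.1 + 1, q.2 + 1) := rfl
    rw [hq]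
    have hne : q.1 + 1 ≠ 0 := by omega
    simp only [hne, if_false]
    rw [Rb_blank]

lemma Tb_fallback (rest : List String) (hh : (flagsOf rest).headD false = false) :
    Tb rest = "</p>" :: Rb rest := by
  cases hfl : flagsOf rest with
  | nil => simp [Tb, Rb, hfl, runB]
  | cons f gs =>
    rw [hfl] at hh
    simp at hh
    subst hh
    simp only [Tb, hfl, runB, Bool.false_eq_true, if_false]
    cases hg : runB gs with
    | nil => simp [Rb, hfl, runB, hg]
    | cons q qs => simp [Rb, hfl, runB, hg, shiftP]

lemma Tb_nonblank (x : String) (rest : List String) (hx : x ≠ "") :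
    Tb (x :: rest) = x :: Tb rest := by
  have h1 : (decide (x ≠ "")) = true := by simp [hx]
  by_cases hh : (flagsOf rest).headD false = true
  · obtain ⟨e, ps, hre⟩ := runB_head_zero _ hh
    have hh' : (flagsOf rest).head?.getD false = true := by
      simpa [List.headD_eq_head?_getD] using hh
    simp [Tb, flagsOf_cons, h1, runB, hh', hre, render_shift, List.take_succ_cons]
  · have hb : (flagsOf rest).headD false = false := by
      cases hv : (flagsOf rest).headD false
      · rfl
      · exact absurd hv hh
    have hh' : (flagsOf rest).head?.getD false = false := by
      simpa [List.headD_eq_head?_getD] using hb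
    rw [Tb_fallback rest hb]
    simp [Tb, flagsOf_cons, h1, runB, hh', render_shift, Rb]

lemma Rb_nonblank (x : String) (rest : List String) (hx : x ≠ "") :
    Rb (x :: rest) = "<p>" :: x :: Tb rest := by
  have h1 : (decide (x ≠ "")) = true := by simp [hx]
  by_cases hh : (flagsOf rest).headD false = true
  · obtain ⟨e, ps, hre⟩ := runB_head_zero _ hh
    have hh' : (flagsOf rest).head?.getD false = true := by
      simpa [List.headD_eq_head?_getD] using hh
    simp [Rb, Tb, flagsOf_cons, h1, runB, hh', hre, render, List.flatMap_cons,
      List.take_succ_cons]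
    have := render_shift x rest ps
    simp [render] at this
    simp [this]
  · have hb : (flagsOf rest).headD false = false := by
      cases hv : (flagsOf rest).headD false
      · rfl
      · exact absurd hv hh
    have hh' : (flagsOf rest).head?.getD false = false := by
      simpa [List.headD_eq_head?_getD] using hb
    rw [Tb_fallback rest hb]
    simp [Rb, flagsOf_cons, h1, runB, hh', render, List.flatMap_cons]
    have := render_shift x rest (runB (flagsOf rest))
    simp [render] at this
    simp [this]

lemma convertParasGo_eq (ls : List String) :
    ∀ (acc : List String) (inside : Bool),
      convertParasGo ls acc inside
        = acc ++ (if inside then Tb (ls.map PySem.Str.strip) else Rb (ls.map PySem.Str.strip)) := by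
  induction ls with
  | nil =>
    intro acc inside
    cases inside <;> simp [convertParasGo, Tb_nil, Rb_nil]
  | cons l rest ih =>
    intro acc inside
    by_cases h : PySem.Str.strip l = ""
    · cases inside <;>
        simp [convertParasGo, h, ih, Tb_blank, Rb_blank]
    · cases inside <;>
        simp [convertParasGo, h, ih, Tb_nonblank _ _ h, Rb_nonblank _ _ h]

lemma map_fst_shift (l : List (Nat × Nat)) :
    (l.map shiftP).map Prod.fst = (l.map Prod.fst).map (· + 1) := by
  induction l with
  | nil => rfl
  | cons p ps ih => simp [ih, shiftP]

lemma map_snd_shift (l : List (Nat × Nat)) :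
    (l.map shiftP).map Prod.snd = (l.map Prod.snd).map (· + 1) := by
  induction l with
  | nil => rfl
  | cons p ps ih => simp [ih, shiftP]

-- sIdx/eIdx (the recursive forms of B's boundary comprehensions) list exactly the
-- first/second components of the run bounds
lemma sIdx_runB (fl : List Bool) :
    sIdx false fl = (runB fl).map Prod.fst ∧
    sIdx true fl = (if fl.headD false = true then ((runB fl).map Prod.fst).tail
                    else (runB fl).map Prod.fst) := by
  induction fl with
  | nil => simp [sIdx, runB]
  | cons f fs ih =>
    obtain ⟨ih0, ih1⟩ := ih
    cases f with
    | false =>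
      have hrec : sIdx false (false :: fs) = (sIdx false fs).map (· + 1) := by
        simp [sIdx]
      have hrec' : sIdx true (false :: fs) = (sIdx false fs).map (· + 1) := by
        simp [sIdx]
      have hr : runB (false :: fs) = (runB fs).map shiftP := by simp [runB]
      constructor
      · rw [hrec, hr, map_fst_shift, ih0]
      · rw [hrec', hr, map_fst_shift, ih0]
        simp
    | true =>
      by_cases hh : fs.headD false = true
      · obtain ⟨e, ps, hre⟩ := runB_head_zero fs hh
        have hh2 : fs.head?.getD false = true := by
          simpa [List.headD_eq_head?_getD] using hh
        have hr : runB (true :: fs) = (0, e + 1) :: ps.map shiftP := by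
          simp [runB, hh2, hre]
        have hstep : sIdx true fs = ps.map Prod.fst := by
          rw [ih1, if_pos hh, hre]
          simp
        constructor
        · have : sIdx false (true :: fs) = 0 :: (sIdx true fs).map (· + 1) := by
            simp [sIdx]
          rw [this, hstep, hr]
          simp only [List.map_cons, map_fst_shift]
        · have : sIdx true (true :: fs) = (sIdx true fs).map (· + 1) := by
            simp [sIdx]
          rw [this, hstep, hr, if_pos (by simp : (true :: fs).headD false = true)]
          simp only [List.map_cons, map_fst_shift, List.tail_cons]
      · have hb : fs.headD false = false := by
          cases hv : fs.headD false
          · rfl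
          · exact absurd hv hh
        have hb2 : fs.head?.getD false = false := by
          simpa [List.headD_eq_head?_getD] using hb
        have hr : runB (true :: fs) = (0, 0) :: (runB fs).map shiftP := by
          simp [runB, hb2]
        have hstep : sIdx true fs = (runB fs).map Prod.fst := by
          rw [ih1, if_neg (by simp [hb2])]
        constructor
        · have : sIdx false (true :: fs) = 0 :: (sIdx true fs).map (· + 1) := by
            simp [sIdx]
          rw [this, hstep, hr]
          simp only [List.map_cons, map_fst_shift]
        · have : sIdx true (true :: fs) = (sIdx true fs).map (· + 1) := by
            simp [sIdx]
          rw [this, hstep, hr, if_pos (by simp : (true :: fs).headD false = true)]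
          simp only [List.map_cons, map_fst_shift, List.tail_cons]

lemma eIdx_runB (fl : List Bool) : eIdx fl = (runB fl).map Prod.snd := by
  induction fl with
  | nil => simp [eIdx, runB]
  | cons f fs ih =>
    cases f with
    | false =>
      have h1 : eIdx (false :: fs) = (eIdx fs).map (· + 1) := by simp [eIdx]
      have hr0 : runB (false :: fs) = (runB fs).map shiftP := by simp [runB]
      rw [h1, ih, hr0, map_snd_shift]
    | true =>
      by_cases hh : fs.headD false = true
      · obtain ⟨e, ps, hre⟩ := runB_head_zero fs hh
        have hh2 : fs.head?.getD false = true := by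
          simpa [List.headD_eq_head?_getD] using hh
        have h1 : eIdx (true :: fs) = (eIdx fs).map (· + 1) := by simp [eIdx, hh2]
        have hr : runB (true :: fs) = (0, e + 1) :: ps.map shiftP := by
          simp [runB, hh2, hre]
        rw [h1, ih, hre, hr]
        simp only [List.map_cons, map_snd_shift]
      · have hb : fs.headD false = false := by
          cases hv : fs.headD false
          · rfl
          · exact absurd hv hh
        have hb2 : fs.head?.getD false = false := by
          simpa [List.headD_eq_head?_getD] using hb
        have h1 : eIdx (true :: fs) = 0 :: (eIdx fs).map (· + 1) := by simp [eIdx, hb2]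
        have hr : runB (true :: fs) = (0, 0) :: (runB fs).map shiftP := by
          simp [runB, hb2]
        rw [h1, ih, hr]
        simp only [List.map_cons, map_snd_shift]

-- the index comprehensions of B equal sIdx/eIdx
lemma starts_filter_gen (fl : List Bool) (prev : Bool) :
    (List.range fl.length).filter
      (fun i => fl.getD i false && (if i = 0 then !prev else !(fl.getD (i - 1) false)))
      = sIdx prev fl := by
  induction fl generalizing prev with
  | nil => simp [sIdx]
  | cons f fs ih =>
    rw [List.length_cons, List.range_succ_eq_map, List.filter_cons]
    have hc0 : ((f :: fs).getD 0 false && (if (0 : Nat) = 0 then !prev else !((f :: fs).getD (0 - 1) false)))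
        = (f && !prev) := by simp
    rw [hc0]
    have htail : (List.filter
        (fun i => (f :: fs).getD i false && (if i = 0 then !prev else !((f :: fs).getD (i - 1) false)))
        ((List.range fs.length).map Nat.succ))
        = ((List.range fs.length).filter
            (fun i => fs.getD i false && (if i = 0 then !f else !(fs.getD (i - 1) false)))).map Nat.succ := by
      rw [List.filter_map]
      congr 1
      apply List.filter_congr
      intro i _
      cases i with
      | zero => simp [Function.comp]
      | succ j => simp [Function.comp]
    rw [htail, ih f]
    cases hfp : (f && !prev) with
    | true => simp [sIdx, hfp]
    | false => simp [sIdx, hfp]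

lemma ends_filter_gen (fl : List Bool) :
    (List.range fl.length).filter (fun i => fl.getD i false && !(fl.getD (i + 1) false))
      = eIdx fl := by
  induction fl with
  | nil => simp [eIdx]
  | cons f fs ih =>
    rw [List.length_cons, List.range_succ_eq_map, List.filter_cons]
    have hc0 : ((f :: fs).getD 0 false && !((f :: fs).getD (0 + 1) false))
        = (f && !(fs.head?.getD false)) := by
      have h00 : fs[0]?.getD false = fs.head?.getD false := by cases fs <;> rfl
      simp [h00]
    rw [hc0]
    have htail : (List.filter (fun i => (f :: fs).getD i false && !((f :: fs).getD (i + 1) false))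
        ((List.range fs.length).map Nat.succ))
        = ((List.range fs.length).filter (fun i => fs.getD i false && !(fs.getD (i + 1) false))).map
            Nat.succ := by
      rw [List.filter_map]
      congr 1
    rw [htail, ih]
    cases hfp : (f && !(fs.head?.getD false)) with
    | true => simp [eIdx, hfp]
    | false => simp [eIdx, hfp]

lemma starts_filter (fl : List Bool) :
    (List.range fl.length).filter
      (fun i => fl.getD i false && (decide (i = 0) || !(fl.getD (i - 1) false)))
      = (runB fl).map Prod.fst := by
  have hcond : (fun i => fl.getD i false && (decide (i = 0) || !(fl.getD (i - 1) false)))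
      = (fun i => fl.getD i false && (if i = 0 then !false else !(fl.getD (i - 1) false))) := by
    funext i
    cases i with
    | zero => simp
    | succ j => simp
  rw [hcond, starts_filter_gen fl false, (sIdx_runB fl).1]

lemma ends_filter (fl : List Bool) :
    (List.range fl.length).filter
      (fun i => fl.getD i false && (decide (i = fl.length - 1) || !(fl.getD (i + 1) false)))
      = (runB fl).map Prod.snd := by
  have hcond : (List.range fl.length).filter
      (fun i => fl.getD i false && (decide (i = fl.length - 1) || !(fl.getD (i + 1) false)))
      = (List.range fl.length).filter (fun i => fl.getD i false && !(fl.getD (i + 1) false)) := by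
    apply List.filter_congr
    intro i hi
    rw [List.mem_range] at hi
    by_cases hlast : i = fl.length - 1
    · subst hlast
      have hout : fl.getD (fl.length - 1 + 1) false = false :=
        List.getD_eq_default _ _ (by omega)
      rw [hout]
      simp
    · simp [hlast]
  rw [hcond, ends_filter_gen fl, eIdx_runB fl]

lemma alt_eq (lines : List String) :
    convert_paragraphs_alt lines = Rb (lines.map PySem.Str.strip) := by
  have hfl : (lines.map PySem.Str.strip).map (fun s => decide (s ≠ ""))
      = flagsOf (lines.map PySem.Str.strip) := rfl
  have hlen : lines.length = (flagsOf (lines.map PySem.Str.strip)).length := by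
    simp [flagsOf]
  simp only [convert_paragraphs_alt, hfl]
  rw [hlen, starts_filter, ends_filter, List.zip_map']
  simp [Rb, render]

-- ===== VERDICT (by name: the statement is the Claim_ definition above) =====
theorem convert_paragraphs_spec : Claim_equal_convert_paragraphs := by
  intro lines _
  show convert_paragraphs lines = convert_paragraphs_alt lines
  rw [convert_paragraphs, convertParasGo_eq, alt_eq]
  simp
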